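-- pv_equiv track=rewrite | github.com/Julius6262/Python-programming-Advanced-and-Intro | part04-31_all_longest_in_list/src/all_longest_in_list.py | all_the_longest
-- ===== SOURCE A (Python) =====
-- def all_the_longest(arg_list):
--     best_so_far = ""
--     new_list = []
--     for word in arg_list:
--         if len(word) > len(best_so_far):
--             best_so_far = word
--     for w in arg_list:
--         if len(best_so_far) == len(w) and w not in new_list:
--             new_list.append(w)
--     return new_list
-- ===== SOURCE B (Python) =====
-- def all_the_longest(arg_list):
--     maxlen = -1
--     result = []
--     for word in arg_list:
--         n = len(word)
--         if n > maxlen: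
--             maxlen = n
--             result = [word]
--         elif n == maxlen and word not in result:
--             result.append(word)
--     return result
-- ===== Notes on version B (the rewrite author's own statement) =====
-- stated objective: alternative
-- what changed: Replaces A's two sequential scans (find longest word, then filter-and-dedup) with a single pass keeping a running maximum length and resetting the accumulator whenever a strictly longer word arrives.
import Mathlib
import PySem

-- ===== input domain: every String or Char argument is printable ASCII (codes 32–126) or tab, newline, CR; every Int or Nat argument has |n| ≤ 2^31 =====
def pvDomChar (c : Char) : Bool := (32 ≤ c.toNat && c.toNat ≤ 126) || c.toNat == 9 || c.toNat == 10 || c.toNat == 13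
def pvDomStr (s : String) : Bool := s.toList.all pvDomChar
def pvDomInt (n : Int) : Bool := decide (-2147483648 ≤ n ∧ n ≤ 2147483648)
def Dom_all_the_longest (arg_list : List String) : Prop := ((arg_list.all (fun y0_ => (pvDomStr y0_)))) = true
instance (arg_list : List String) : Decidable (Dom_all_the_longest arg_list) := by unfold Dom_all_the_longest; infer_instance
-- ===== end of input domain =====

-- B replaces A's two sequential scans (find the longest word, then filter+dedup) with one
-- running-best scan that resets the accumulator when a strictly longer word arrives (objective: alternative).

-- ===== PORT A =====
-- first loop: best_so_far
def pvBestStep (b w : String) : String :=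
  if w.length > b.length then w else b

-- second loop: filter by the best length and dedup
def pvCollectStep (n : Nat) (acc : List String) (w : String) : List String :=
  if n = w.length ∧ w ∉ acc then acc ++ [w] else acc

def all_the_longest (arg_list : List String) : List String :=
  let best_so_far := arg_list.foldl pvBestStep ""
  arg_list.foldl (pvCollectStep best_so_far.length) []

-- ===== PORT B =====
def pvAltStep (s : Int × List String) (w : String) : Int × List String :=
  if (w.length : Int) > s.1 then ((w.length : Int), [w])
  else if (w.length : Int) = s.1 ∧ w ∉ s.2 then (s.1, s.2 ++ [w])
  else s

def all_the_longest_alt (arg_list : List String) : List String :=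
  (arg_list.foldl pvAltStep (-1, [])).2

-- ===== PRECONDITION & SPEC =====
def Spec_all_the_longest (arg_list : List String) (out : List String) : Prop := out = all_the_longest_alt arg_list
instance (arg_list : List String) (out : List String) : Decidable (Spec_all_the_longest arg_list out) := by unfold Spec_all_the_longest; infer_instance

-- ===== CLAIM (what is proved, stated in full; the proofs are below) =====
def Claim_equal_all_the_longest : Prop := ∀ (arg_list : List String), Dom_all_the_longest arg_list → Spec_all_the_longest arg_list (all_the_longest arg_list)

-- ===== LEMMAS AND PROOFS =====

-- maximum word length of a list
def pvMx : List String → Nat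
  | [] => 0
  | w :: xs => max w.length (pvMx xs)

-- B's second branch, as a fold with Int threshold
def pvCollectStepI (m : Int) (acc : List String) (w : String) : List String :=
  if (w.length : Int) = m ∧ w ∉ acc then acc ++ [w] else acc

lemma pvMx_mem (xs : List String) : ∀ v ∈ xs, v.length ≤ pvMx xs := by
  induction xs with
  | nil => simp
  | cons a as ih =>
    intro v hv
    rcases List.mem_cons.mp hv with h | h
    · simp [pvMx, h]
    · have := ih v h
      simp [pvMx]; omega

lemma pvMx_le (xs : List String) (n : Nat) (h : ∀ v ∈ xs, v.length ≤ n) : pvMx xs ≤ n := by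
  induction xs with
  | nil => simp [pvMx]
  | cons a as ih =>
    simp only [pvMx, max_le_iff]
    exact ⟨h a (by simp), ih (fun v hv => h v (by simp [hv]))⟩

lemma pvBest_len (xs : List String) : ∀ b, (xs.foldl pvBestStep b).length = max b.length (pvMx xs) := by
  induction xs with
  | nil => intro b; simp [pvMx]
  | cons w xs ih =>
    intro b
    simp only [List.foldl_cons, pvMx, ih, pvBestStep]
    split_ifs <;> omega

lemma pvCollectI_cast (n : Nat) (xs : List String) : ∀ r,
    xs.foldl (pvCollectStepI (n : Int)) r = xs.foldl (pvCollectStep n) r := by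
  induction xs with
  | nil => intro r; rfl
  | cons w xs ih =>
    intro r
    simp only [List.foldl_cons, pvCollectStepI, pvCollectStep]
    have h : ((w.length : Int) = (n : Int)) ↔ (n = w.length) := by omega
    rw [ih]
    congr 1
    simp [h]

lemma pvAlt_main (xs : List String) : ∀ (m : Int) (r : List String),
    xs.foldl pvAltStep (m, r) =
      if ∃ w ∈ xs, (w.length : Int) > m then ((pvMx xs : Int), xs.foldl (pvCollectStepI (pvMx xs)) [])
      else (m, xs.foldl (pvCollectStepI m) r) := by
  induction xs with
  | nil => intro m r; simp
  | cons w xs ih =>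
    intro m r
    simp only [List.foldl_cons]
    by_cases hw : (w.length : Int) > m
    · have hstep : pvAltStep (m, r) w = ((w.length : Int), [w]) := by
        simp [pvAltStep, hw]
      rw [hstep, ih]
      have hex : ∃ u ∈ w :: xs, (u.length : Int) > m := ⟨w, by simp, hw⟩
      by_cases hx : ∃ u ∈ xs, (u.length : Int) > (w.length : Int)
      · -- tail contains a strictly longer word
        obtain ⟨u, hu, hul⟩ := hx
        have hlt : w.length < pvMx xs := by
          have := pvMx_mem xs u hu
          omega
        have hMxeq : pvMx (w :: xs) = pvMx xs := by simp [pvMx]; omega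
        have hskip : pvCollectStepI ((pvMx xs : Int)) [] w = ([] : List String) := by
          unfold pvCollectStepI
          rw [if_neg]
          rintro ⟨h1, -⟩
          omega
        rw [if_pos ⟨u, hu, hul⟩, if_pos hex, hMxeq]
        simp only [hskip]
      · -- w is (one of) the longest
        rw [if_neg hx, if_pos hex]
        have hMx2 : pvMx xs ≤ w.length := by
          refine pvMx_le xs w.length (fun v hv => ?_)
          by_contra hcon
          exact hx ⟨v, hv, by omega⟩
        have hMxeq : pvMx (w :: xs) = w.length := by simp [pvMx]; omega
        have h1 : pvCollectStepI ((w.length : Nat) : Int) [] w = [w] := by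
          simp [pvCollectStepI]
        rw [hMxeq, h1]
    · -- w does not beat the running max
      have hiff : (∃ u ∈ w :: xs, (u.length : Int) > m) ↔ (∃ u ∈ xs, (u.length : Int) > m) := by
        constructor
        · rintro ⟨u, hu, hul⟩
          rcases List.mem_cons.mp hu with h | h
          · exact absurd (h ▸ hul) hw
          · exact ⟨u, h, hul⟩
        · rintro ⟨u, hu, hul⟩; exact ⟨u, by simp [hu], hul⟩
      have hstep : pvAltStep (m, r) w = (m, pvCollectStepI m r w) := by
        simp only [pvAltStep, pvCollectStepI]
        rw [if_neg hw]
        split_ifs <;> rfl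
      rw [hstep, ih]
      by_cases hx : ∃ u ∈ xs, (u.length : Int) > m
      · rw [if_pos hx, if_pos (hiff.mpr hx)]
        obtain ⟨u, hu, hul⟩ := hx
        have hMle := pvMx_mem xs u hu
        have hMxeq : pvMx (w :: xs) = pvMx xs := by simp [pvMx]; omega
        have hskip : pvCollectStepI ((pvMx xs : Int)) [] w = ([] : List String) := by
          unfold pvCollectStepI
          rw [if_neg]
          rintro ⟨h1, -⟩
          have := pvMx_mem xs u hu
          omega
        rw [hMxeq]
        simp only [hskip]
      · rw [if_neg hx, if_neg (fun h => hx (hiff.mp h))]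

-- ===== VERDICT (by name: the statement is the Claim_ definition above) =====
theorem all_the_longest_spec : Claim_equal_all_the_longest := by
  intro xs _
  unfold Spec_all_the_longest all_the_longest all_the_longest_alt
  rw [pvAlt_main]
  cases xs with
  | nil => simp
  | cons w ws =>
    have hex : ∃ u ∈ w :: ws, (u.length : Int) > (-1 : Int) := ⟨w, by simp, by omega⟩
    rw [if_pos hex]
    simp only
    rw [pvCollectI_cast]
    have h2 : ((w :: ws).foldl pvBestStep "").length = pvMx (w :: ws) := by
      rw [pvBest_len]
      simp
    rw [h2]
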